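-- pv_equiv track=rewrite | github.com/theholy7/vivacity-proj | vivacity/integration.py | candidate_cells
-- ===== SOURCE A (Python) =====
-- from operator import itemgetter
--
-- def candidate_cells(start_x, start_y, know_path):
--
--     path = sorted(know_path, key=itemgetter(2))[::-1]
--
--     start_cell = [x for x in path if x[0] == start_x and x[1] == start_y][0]
--
--     path.remove(start_cell)
--     final_path = [start_cell]
--     current_cell = start_cell
--
--     candidate_cells = [cell for cell in path if
--                        (cell[0] == current_cell[0] and
--                         current_cell[1] - 1 <= cell[1] <= current_cell[1] + 1 and
--                         cell[2] < current_cell[2])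
--                        or
--                        (current_cell[0] - 1 <= cell[0] <= current_cell[0] + 1
--                         and cell[1] == current_cell[1]
--                         and cell[2] < current_cell[2])]
--
--     return candidate_cells
-- ===== SOURCE B (Python) =====
-- from operator import itemgetter
--
-- def candidate_cells(start_x, start_y, know_path):
--     # cost of the start cell = highest cost among cells at (start_x, start_y)
--     start_cost = max(c[2] for c in know_path if c[0] == start_x and c[1] == start_y)
--
--     def ok(cell):
--         x, y, cost = cell
--         if cost >= start_cost:
--             return False
--         return ((x == start_x and start_y - 1 <= y <= start_y + 1)
--                 or (y == start_y and start_x - 1 <= x <= start_x + 1))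
--
--     cands = [c for c in know_path if ok(c)]
--     return sorted(cands, key=itemgetter(2))[::-1]
-- ===== Notes on version B (the rewrite author's own statement) =====
-- stated objective: simpler
-- what changed: Instead of sorting the whole path, removing the start cell and filtering the sorted copy, B computes the start cost directly as the max cost at (start_x,start_y), filters the original list, and sorts only the (usually small) candidate list with the same [::-1] tie order.
import Mathlib
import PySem

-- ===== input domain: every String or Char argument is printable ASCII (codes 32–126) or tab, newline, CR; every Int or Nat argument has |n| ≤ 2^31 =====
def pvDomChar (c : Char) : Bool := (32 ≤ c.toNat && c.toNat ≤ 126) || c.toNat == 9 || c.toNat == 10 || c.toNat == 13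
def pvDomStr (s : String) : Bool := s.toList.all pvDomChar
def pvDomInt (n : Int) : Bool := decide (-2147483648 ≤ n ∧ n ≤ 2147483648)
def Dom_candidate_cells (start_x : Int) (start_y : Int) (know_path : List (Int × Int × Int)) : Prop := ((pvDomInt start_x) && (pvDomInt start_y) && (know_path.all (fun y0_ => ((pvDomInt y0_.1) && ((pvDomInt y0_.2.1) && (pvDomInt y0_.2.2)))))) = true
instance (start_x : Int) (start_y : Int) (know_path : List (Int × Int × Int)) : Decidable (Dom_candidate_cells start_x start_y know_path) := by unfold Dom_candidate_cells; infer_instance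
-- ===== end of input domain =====

-- B replaces A's sort-everything/remove/filter pipeline by: max cost at the start
-- coordinates, one filter over the original list, one sort of the candidates only
-- (objective: simpler; same return value).

-- ===== PORT A =====
-- A's neighbour predicate, with current_cell = start_cell (literal transliteration of the comprehension's condition)
def pvPredA (cc cell : Int × Int × Int) : Bool :=
  (cell.1 == cc.1 && (cc.2.1 - 1 ≤ cell.2.1 && cell.2.1 ≤ cc.2.1 + 1) && cell.2.2 < cc.2.2)
  || ((cc.1 - 1 ≤ cell.1 && cell.1 ≤ cc.1 + 1) && cell.2.1 == cc.2.1 && cell.2.2 < cc.2.2)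

-- 'sorted(know_path, key=itemgetter(2))[::-1]' → sorted then .reverse ([::-1] is exactly List.reverse);
-- '[...][0]' → pyGet? _ 0 (none = IndexError, excluded by Pre_); 'path.remove' → PySem.List.remove?
-- (none = ValueError, unreachable here); 'final_path'/'current_cell' are A's dead locals.
def candidate_cells (start_x : Int) (start_y : Int) (know_path : List (Int × Int × Int)) : List (Int × Int × Int) :=
  let path := (PySem.List.sorted know_path (fun c => c.2.2) false).reverse
  match PySem.List.pyGet? (path.filter (fun x => x.1 == start_x && x.2.1 == start_y)) 0 with
  | none => []
  | some start_cell =>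
    match PySem.List.remove? path start_cell with
    | none => []
    | some path' => path'.filter (fun cell => pvPredA start_cell cell)

-- ===== PORT B =====
-- B's 'ok' helper: early False when cost >= start_cost, then the orthogonal-neighbour test
def pvOkB (start_x start_y start_cost : Int) (cell : Int × Int × Int) : Bool :=
  if start_cost ≤ cell.2.2 then false
  else (cell.1 == start_x && (start_y - 1 ≤ cell.2.1 && cell.2.1 ≤ start_y + 1))
       || (cell.2.1 == start_y && (start_x - 1 ≤ cell.1 && cell.1 ≤ start_x + 1))

-- 'max(generator)' → max? over the filtered-and-mapped list (none = ValueError, excluded by Pre_)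
def candidate_cells_alt (start_x : Int) (start_y : Int) (know_path : List (Int × Int × Int)) : List (Int × Int × Int) :=
  match PySem.List.max? ((know_path.filter (fun c => c.1 == start_x && c.2.1 == start_y)).map (fun c => c.2.2)) (fun v => v) with
  | none => []
  | some start_cost =>
    let cands := know_path.filter (fun c => pvOkB start_x start_y start_cost c)
    (PySem.List.sorted cands (fun c => c.2.2) false).reverse

-- ===== PRECONDITION & SPEC =====
-- Pre_: some cell of know_path lies at (start_x, start_y); otherwise A raises IndexError on '[...][0]'.
def Pre_candidate_cells (start_x : Int) (start_y : Int) (know_path : List (Int × Int × Int)) : Prop :=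
  ∃ c ∈ know_path, c.1 = start_x ∧ c.2.1 = start_y
instance (start_x : Int) (start_y : Int) (know_path : List (Int × Int × Int)) : Decidable (Pre_candidate_cells start_x start_y know_path) := by unfold Pre_candidate_cells; infer_instance

def pvWitness_candidate_cells : Int × Int × (List (Int × Int × Int)) := (0, 0, [(0, 0, 5), (0, 1, 3), (1, 0, 5)])

def Spec_candidate_cells (start_x : Int) (start_y : Int) (know_path : List (Int × Int × Int)) (out : List (Int × Int × Int)) : Prop := out = candidate_cells_alt start_x start_y know_path
instance (start_x : Int) (start_y : Int) (know_path : List (Int × Int × Int)) (out : List (Int × Int × Int)) : Decidable (Spec_candidate_cells start_x start_y know_path out) := by unfold Spec_candidate_cells; infer_instance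

-- ===== CLAIM (what is proved, stated in full; the proofs are below) =====
def Claim_equal_candidate_cells : Prop := ∀ (start_x : Int) (start_y : Int) (know_path : List (Int × Int × Int)), Dom_candidate_cells start_x start_y know_path → Pre_candidate_cells start_x start_y know_path → Spec_candidate_cells start_x start_y know_path (candidate_cells start_x start_y know_path)

-- ===== LEMMAS AND PROOFS =====

-- filtering commutes with insertBy into a key-sorted accumulator
lemma pv_filter_insertBy {α : Type} (key : α → Int) (p : α → Bool) (x : α) (acc : List α)
    (h : acc.Pairwise (fun a b => key a ≤ key b)) :
    (PySem.List.insertBy (fun a b => decide (key a < key b)) x acc).filter p =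
      if p x then PySem.List.insertBy (fun a b => decide (key a < key b)) x (acc.filter p)
      else acc.filter p := by
  induction acc with
  | nil => cases hpx : p x <;> simp [PySem.List.insertBy, List.filter, hpx]
  | cons y ys ih =>
    have hy := (List.pairwise_cons.mp h).1
    have htail := (List.pairwise_cons.mp h).2
    by_cases hlt : key x < key y
    · simp only [PySem.List.insertBy, hlt, decide_true, if_true]
      by_cases hpx : p x
      · by_cases hpy : p y
        · simp [List.filter, hpx, hpy, PySem.List.insertBy, hlt]
        · simp only [List.filter, hpx, hpy, if_pos]
          cases hfy : ys.filter p with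
          | nil => simp [PySem.List.insertBy]
          | cons z zs =>
            have hz : z ∈ ys := List.mem_of_mem_filter (hfy ▸ List.mem_cons_self)
            have : key x < key z := lt_of_lt_of_le hlt (hy z hz)
            simp [PySem.List.insertBy, this]
      · simp [List.filter, hpx]
    · simp only [PySem.List.insertBy, hlt, decide_false]
      by_cases hpy : p y
      · simp [List.filter, hpy, ih htail, PySem.List.insertBy, hlt]
        split <;> simp [hpy]
      · simp [List.filter, hpy, ih htail]

-- Python's stable sort commutes with filter
lemma pv_sorted_filter {α : Type} (key : α → Int) (p : α → Bool) (xs : List α) :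
    (PySem.List.sorted xs key false).filter p = PySem.List.sorted (xs.filter p) key false := by
  induction xs using List.reverseRecOn with
  | nil => rfl
  | append_singleton xs x ih =>
    have hstep : ∀ (l : List α), PySem.List.sorted (l ++ [x]) key false =
        PySem.List.insertBy (fun a b => decide (key a < key b)) x (PySem.List.sorted l key false) := by
      intro l
      rw [PySem.List.sorted_eq_foldl_insertBy, PySem.List.sorted_eq_foldl_insertBy, List.foldl_append]
      rfl
    rw [hstep, pv_filter_insertBy key p x _ (PySem.List.sorted_pairwise xs key), ih]
    by_cases hpx : p x
    · rw [if_pos hpx, List.filter_append]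
      simp only [List.filter, hpx]
      rw [hstep]
    · rw [if_neg hpx, List.filter_append]
      simp [List.filter, hpx]

-- the two neighbour predicates agree once the start cell's coordinates and cost are known
lemma pv_pred_eq (sc : Int × Int × Int) (sx sy v : Int) (h1 : sc.1 = sx) (h2 : sc.2.1 = sy)
    (hv : v = sc.2.2) : ∀ cell, pvPredA sc cell = pvOkB sx sy v cell := by
  intro cell
  subst h1 h2 hv
  by_cases hge : sc.2.2 ≤ cell.2.2
  · rw [pvOkB, if_pos hge]
    simp only [pvPredA, Bool.eq_false_iff, ne_eq, Bool.or_eq_true, Bool.and_eq_true,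
      decide_eq_true_eq, beq_iff_eq, not_or, not_and]
    omega
  · rw [pvOkB, if_neg hge, Bool.eq_iff_iff]
    simp only [pvPredA, Bool.or_eq_true, Bool.and_eq_true, decide_eq_true_eq, beq_iff_eq]
    omega

-- erasing an element the filter rejects does not change the filter
lemma pv_filter_erase {α : Type} [BEq α] [LawfulBEq α] (p : α → Bool) (a : α) (l : List α)
    (hp : p a = false) : (l.erase a).filter p = l.filter p := by
  induction l with
  | nil => rfl
  | cons b l ih =>
    by_cases hb : b = a
    · subst hb; simp [List.filter, hp]
    · simp [beq_iff_eq, hb, List.filter]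
      cases p b <;> simp [ih]

-- ===== VERDICT (by name: the statement is the Claim_ definition above) =====
theorem candidate_cells_spec : Claim_equal_candidate_cells := by
  intro sx sy kp _ hpre
  unfold Spec_candidate_cells candidate_cells candidate_cells_alt
  have hMne : kp.filter (fun c => c.1 == sx && c.2.1 == sy) ≠ [] := by
    obtain ⟨c, hc, h1, h2⟩ := hpre
    intro h
    have hmem : c ∈ kp.filter (fun c => c.1 == sx && c.2.1 == sy) :=
      List.mem_filter.mpr ⟨hc, by simp [h1, h2]⟩
    rw [h] at hmem; exact absurd hmem (List.not_mem_nil)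
  have hpf : ((PySem.List.sorted kp (fun c => c.2.2) false).reverse.filter
        (fun x => x.1 == sx && x.2.1 == sy)) =
      (PySem.List.sorted (kp.filter (fun c => c.1 == sx && c.2.1 == sy)) (fun c => c.2.2) false).reverse := by
    rw [List.filter_reverse, pv_sorted_filter]
  have hSMne : (PySem.List.sorted (kp.filter (fun c => c.1 == sx && c.2.1 == sy)) (fun c => c.2.2) false).reverse ≠ [] := by
    rw [Ne, List.reverse_eq_nil_iff, PySem.List.sorted_eq_nil_iff]; exact hMne
  cases hrev : (PySem.List.sorted (kp.filter (fun c => c.1 == sx && c.2.1 == sy)) (fun c => c.2.2) false).reverse with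
  | nil => exact absurd hrev hSMne
  | cons sc t =>
  simp only []
  rw [hpf, hrev, PySem.List.pyGet?_zero_cons]
  have hscM : sc ∈ kp.filter (fun c => c.1 == sx && c.2.1 == sy) := by
    rw [← PySem.List.mem_sorted _ (fun c => c.2.2) false, ← List.mem_reverse, hrev]
    exact List.mem_cons_self
  obtain ⟨hsc_kp, hscm⟩ := List.mem_filter.mp hscM
  have hsc1 : sc.1 = sx := by simpa using (Bool.and_elim_left hscm)
  have hsc2 : sc.2.1 = sy := by simpa using (Bool.and_elim_right hscm)
  have hmax : ∀ c ∈ kp.filter (fun c => c.1 == sx && c.2.1 == sy), c.2.2 ≤ sc.2.2 := by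
    intro c hc
    have hSMeq : PySem.List.sorted (kp.filter (fun c => c.1 == sx && c.2.1 == sy)) (fun c => c.2.2) false
        = t.reverse ++ [sc] := by
      rw [← List.reverse_reverse (PySem.List.sorted _ _ _), hrev, List.reverse_cons]
    have hpw := PySem.List.sorted_pairwise (kp.filter (fun c => c.1 == sx && c.2.1 == sy)) (fun c => c.2.2)
    rw [hSMeq, List.pairwise_append] at hpw
    have hcSM : c ∈ t.reverse ++ [sc] := by
      rw [← hSMeq, PySem.List.mem_sorted]; exact hc
    rcases List.mem_append.mp hcSM with h | h
    · exact hpw.2.2 c h sc (List.mem_singleton.mpr rfl)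
    · rw [List.mem_singleton.mp h]
  have hscpath : sc ∈ (PySem.List.sorted kp (fun c => c.2.2) false).reverse := by
    rw [List.mem_reverse, PySem.List.mem_sorted]; exact hsc_kp
  simp only []
  rw [PySem.List.remove?_eq_some_erase _ sc hscpath]
  simp only []
  have hfA : pvPredA sc sc = false := by simp [pvPredA]
  rw [pv_filter_erase _ _ _ hfA, List.filter_reverse, pv_sorted_filter]
  -- B side: the max? cannot be none, and its value is sc's cost
  cases hmx : PySem.List.max? ((kp.filter (fun c => c.1 == sx && c.2.1 == sy)).map (fun c => c.2.2)) (fun v => v) with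
  | none =>
    rw [PySem.List.max?_eq_none_iff, List.map_eq_nil_iff] at hmx
    exact absurd hmx hMne
  | some v =>
    obtain ⟨c0, hc0, hvc0⟩ := List.mem_map.mp (PySem.List.max?_mem hmx)
    have hvle : v ≤ sc.2.2 := hvc0 ▸ hmax c0 hc0
    have hlev : sc.2.2 ≤ v :=
      PySem.List.max?_isMax hmx sc.2.2 (List.mem_map.mpr ⟨sc, hscM, rfl⟩)
    have hveq : v = sc.2.2 := le_antisymm hvle hlev
    simp only []
    rw [List.filter_congr (fun cell _ => pv_pred_eq sc sx sy v hsc1 hsc2 hveq cell)]
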